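-- pv_equiv track=rewrite | github.com/Sandeep-Varma/cp | codeforces/ICPC_27Nov/m_script.py | correct_ans
-- ===== SOURCE A (Python) =====
-- from math import lcm
--
-- def correct_ans(n:int):
--     m = n-1
--     a1 = 1
--     for a in range(1,int((n+2)/2)):
--         if (lcm(a,n-a) < m):
--             a1 = a
--             m = lcm(a,n-a)
--     return str(a1)+" "+str(n-a1)+"\n"
-- ===== SOURCE B (Python) =====
-- def correct_ans(n: int):
--     # a = n // (smallest prime factor of n) minimizes lcm(a, n-a); trial division to sqrt(n)
--     if n < 4:
--         return "1 " + str(n - 1) + "\n"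
--     d = 2
--     while d * d <= n:
--         if n % d == 0:
--             a = n // d
--             return str(a) + " " + str(n - a) + "\n"
--         d += 1
--     return "1 " + str(n - 1) + "\n"
-- ===== Notes on version B (the rewrite author's own statement) =====
-- stated objective: faster
-- what changed: Replaces the O(n) scan over all a<(n+2)/2 tracking the running minimum of lcm(a,n-a) by trial division up to sqrt(n) for the smallest prime factor p of n, returning a = n//p directly (a = 1 when n is prime or n < 4).
import Mathlib
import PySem

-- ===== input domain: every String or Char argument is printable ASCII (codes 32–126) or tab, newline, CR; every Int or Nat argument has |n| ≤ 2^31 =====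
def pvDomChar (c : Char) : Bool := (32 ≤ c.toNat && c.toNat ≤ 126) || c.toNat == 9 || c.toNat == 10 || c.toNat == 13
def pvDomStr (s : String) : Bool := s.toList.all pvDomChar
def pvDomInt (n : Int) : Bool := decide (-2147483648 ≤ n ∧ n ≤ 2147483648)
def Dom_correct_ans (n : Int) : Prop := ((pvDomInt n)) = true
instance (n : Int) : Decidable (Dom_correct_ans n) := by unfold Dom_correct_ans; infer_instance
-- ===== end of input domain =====

-- B replaces A's linear scan minimizing lcm(a, n-a) by trial division for the
-- smallest prime factor p of n (a = n//p; a = 1 when n is prime or n < 4): asymptotically faster.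

-- ===== PORT A =====
-- int(x/2) of Python: float division by 2 is exact for |x| ≤ 2^31+2 < 2^53 and int() truncates
-- toward zero, so this helper is exact on the domain.
def intHalfTrunc (x : Int) : Int := if 0 ≤ x then x / 2 else -((-x) / 2)

-- math.lcm(a, b) = |a*b| / gcd, nonnegative: exactly Int.lcm (a Nat) cast to Int.
def pvStep (n : Int) (st : Int × Int) (a : Int) : Int × Int :=
  if (Int.lcm a (n - a) : Int) < st.2 then (a, (Int.lcm a (n - a) : Int)) else st

def correct_ans (n : Int) : String :=
  let st := (PySem.List.pyRange 1 (intHalfTrunc (n + 2)) 1).foldl (pvStep n) (1, n - 1)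
  PySem.Int.toStr st.1 ++ " " ++ PySem.Int.toStr (n - st.1) ++ "\n"

-- ===== PORT B =====
-- Source B's while loop, d counting up while d*d <= n; the '2 ≤ d' conjunct only records the
-- invariant of the single call site (d starts at 2 and increments) so the recursion terminates.
def spfAux (n d : Int) : Option Int :=
  if h : 2 ≤ d ∧ d * d ≤ n then
    if PySem.Int.mod n d = 0 then some d else spfAux n (d + 1)
  else none
termination_by (n + 1 - d).toNat
decreasing_by
  have h2d : 2 * d ≤ d * d := by nlinarith [h.1]
  omega

def correct_ans_alt (n : Int) : String :=
  if n < 4 then "1 " ++ PySem.Int.toStr (n - 1) ++ "\n"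
  else
    match spfAux n 2 with
    | some d =>
        let a := PySem.Int.floordiv n d
        PySem.Int.toStr a ++ " " ++ PySem.Int.toStr (n - a) ++ "\n"
    | none => "1 " ++ PySem.Int.toStr (n - 1) ++ "\n"

-- ===== PRECONDITION & SPEC =====
def Spec_correct_ans (n : Int) (out : String) : Prop := out = correct_ans_alt n
instance (n : Int) (out : String) : Decidable (Spec_correct_ans n out) := by unfold Spec_correct_ans; infer_instance

-- ===== CLAIM (what is proved, stated in full; the proofs are below) =====
def Claim_equal_correct_ans : Prop := ∀ (n : Int), Dom_correct_ans n → Spec_correct_ans n (correct_ans n)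

-- ===== LEMMAS AND PROOFS =====

-- lcm of positives with a ∣ b is b
lemma lcm_of_dvd {a b : Int} (hb : 0 < b) (hd : a ∣ b) :
    (Int.lcm a b : Int) = b := by
  rw [Int.coe_lcm]
  have h1 : GCDMonoid.lcm a b ∣ b := lcm_dvd hd (dvd_refl b)
  have h2 : b ∣ GCDMonoid.lcm a b := dvd_lcm_right a b
  exact Int.dvd_antisymm (Int.lcm_nonneg a b) (le_of_lt hb) h1 h2

-- lcm of positives with a ∤ b is at least 2*b
lemma lcm_of_not_dvd {a b : Int} (ha : 0 < a) (hb : 0 < b) (hd : ¬ a ∣ b) :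
    2 * b ≤ (Int.lcm a b : Int) := by
  rw [Int.coe_lcm]
  have h2 : b ∣ GCDMonoid.lcm a b := dvd_lcm_right a b
  have hne : GCDMonoid.lcm a b ≠ b := by
    intro he; exact hd (he ▸ dvd_lcm_left a b)
  have hpos : 0 < GCDMonoid.lcm a b :=
    (Int.lcm_nonneg a b).lt_of_ne (fun he => by
      rcases (lcm_eq_zero_iff a b).1 he.symm with h | h <;> omega)
  obtain ⟨k, hk⟩ := h2
  have hk1 : 1 ≤ k := by nlinarith
  have hk2 : k ≠ 1 := by rintro rfl; rw [mul_one] at hk; exact hne hk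
  have : 2 ≤ k := by omega
  nlinarith

lemma fold_no_improve (n : Int) (L : List Int) (c m : Int)
    (h : ∀ a ∈ L, ¬ (Int.lcm a (n - a) : Int) < m) :
    L.foldl (pvStep n) (c, m) = (c, m) := by
  induction L with
  | nil => rfl
  | cons x L ih =>
      simp only [List.foldl_cons, pvStep, if_neg (h x (by simp))]
      exact ih (fun a ha => h a (by simp [ha]))

lemma fold_unique_min (n : Int) (L : List Int) (t : Int)
    (hu : ∀ a ∈ L, a ≠ t → (Int.lcm t (n - t) : Int) < (Int.lcm a (n - a) : Int)) :
    ∀ c m, t ∈ L → (Int.lcm t (n - t) : Int) < m →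
    L.foldl (pvStep n) (c, m) = (t, (Int.lcm t (n - t) : Int)) := by
  induction L with
  | nil => intro c m ht; simp at ht
  | cons x L ih =>
      intro c m ht hm
      by_cases hx : x = t
      · subst hx
        simp only [List.foldl_cons, pvStep, if_pos hm]
        exact fold_no_improve n L x _ (fun a ha => by
          by_cases hat : a = x
          · subst hat; omega
          · exact not_lt.2 (le_of_lt (hu a (by simp [ha]) hat)))
      · have ht' : t ∈ L := by
          rcases List.mem_cons.1 ht with h | h
          · exact absurd h.symm hx
          · exact h
        have hxl : (Int.lcm t (n - t) : Int) < (Int.lcm x (n - x) : Int) :=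
          hu x (by simp) hx
        simp only [List.foldl_cons, pvStep]
        split_ifs with hc
        · exact ih (fun a ha hat => hu a (by simp [ha]) hat) x _ ht' hxl
        · exact ih (fun a ha hat => hu a (by simp [ha]) hat) c m ht' hm

-- spfAux returning some p: p is the least divisor of n among integers ≥ d, and p*p ≤ n
lemma spfAux_some (n : Int) : ∀ d p : Int, spfAux n d = some p →
    d ≤ p ∧ 2 ≤ p ∧ p * p ≤ n ∧ p ∣ n ∧ (∀ e, d ≤ e → e < p → ¬ e ∣ n) := by
  intro d p
  fun_induction spfAux n d with
  | case1 d h hm =>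
      intro he
      have hdp : d = p := by injection he
      subst hdp
      refine ⟨le_refl d, h.1, h.2, ?_, fun e h1 h2 => by omega⟩
      exact (PySem.Int.mod_eq_zero_iff_dvd n d).1 hm
  | case2 d h hm ih =>
      intro he
      obtain ⟨h1, h2, h3, h4, h5⟩ := ih he
      refine ⟨by omega, h2, h3, h4, fun e he1 he2 => ?_⟩
      by_cases hed : e = d
      · subst hed
        intro hdvd
        exact hm ((PySem.Int.mod_eq_zero_iff_dvd n e).2 hdvd)
      · exact h5 e (by omega) he2
  | case3 d h => intro he; simp at he

-- spfAux returning none: no integer e ≥ d with e*e ≤ n divides n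
lemma spfAux_none (n : Int) : ∀ d : Int, spfAux n d = none → 2 ≤ d →
    ∀ e, d ≤ e → e * e ≤ n → ¬ e ∣ n := by
  intro d
  fun_induction spfAux n d with
  | case1 d h hm => intro he; simp at he
  | case2 d h hm ih =>
      intro he hd e he1 he2
      by_cases hed : e = d
      · subst hed
        intro hdvd
        exact hm ((PySem.Int.mod_eq_zero_iff_dvd n e).2 hdvd)
      · exact ih he (by omega) e (by omega) he2
  | case3 d h =>
      intro _ hd e he1 he2
      exfalso
      have : n < d * d := by omega
      nlinarith

-- the two "1 (n-1)" result strings agree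
lemma one_string (m : Int) :
    PySem.Int.toStr 1 ++ " " ++ PySem.Int.toStr m ++ "\n" = "1 " ++ PySem.Int.toStr m ++ "\n" := by
  have h : PySem.Int.toStr 1 ++ " " = "1 " := by decide
  rw [← h]

-- main equality
lemma main_eq (n : Int) : correct_ans n = correct_ans_alt n := by
  unfold correct_ans correct_ans_alt
  by_cases h4 : n < 4
  · rw [if_pos h4]
    by_cases h1 : n < 2
    · rw [PySem.List.pyRange_one_eq_nil (show intHalfTrunc (n+2) ≤ 1 by
        unfold intHalfTrunc; split_ifs <;> omega)]
      exact one_string (n - 1)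
    · have h23 : n = 2 ∨ n = 3 := by omega
      rcases h23 with rfl | rfl <;> decide
  · rw [if_neg h4]
    have hn4 : 4 ≤ n := by omega
    have hb : intHalfTrunc (n + 2) = (n + 2) / 2 := by
      unfold intHalfTrunc; rw [if_pos (by omega)]
    rw [hb]
    cases hspf : spfAux n 2 with
    | some p =>
        obtain ⟨_, hp2, hpp, hpdvd, hmin⟩ := spfAux_some n 2 p hspf
        obtain ⟨t, hpt⟩ := hpdvd
        have hppos : (0:Int) < p := by omega
        have hpt' : p ≤ t := le_of_mul_le_mul_left (by nlinarith) hppos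
        have ht2 : 2 ≤ t := by omega
        have h2t : 2 * t ≤ n := by nlinarith
        have htd : (Int.lcm t (n - t) : Int) = n - t := by
          apply lcm_of_dvd (by omega)
          exact (Dvd.intro p (by linarith)).sub (dvd_refl t)
        have hu : ∀ a ∈ PySem.List.pyRange 1 ((n + 2) / 2) 1, a ≠ t →
            (Int.lcm t (n - t) : Int) < (Int.lcm a (n - a) : Int) := by
          intro a ha hat
          rw [PySem.List.mem_pyRange_one] at ha
          obtain ⟨ha1, ha2⟩ := ha
          have h2a : 2 * a ≤ n := by omega
          rw [htd]
          by_cases hA1 : a = 1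
          · subst hA1
            rw [lcm_of_dvd (by omega) (one_dvd _)]
            omega
          · have ha2' : 2 ≤ a := by omega
            by_cases hdvd : a ∣ n
            · have hfa : (Int.lcm a (n - a) : Int) = n - a :=
                lcm_of_dvd (by omega) (hdvd.sub (dvd_refl a))
              rw [hfa]
              rcases hdvd with ⟨e, he⟩
              have he2 : 2 ≤ e := by nlinarith
              have hat' : a < t := by
                by_contra hc
                have hta : t < a := by omega
                have hep : e < p := by nlinarith
                exact hmin e (by omega) hep ⟨a, by linarith⟩
              omega
            · have hnd : ¬ a ∣ n - a := by
                intro hh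
                exact hdvd (by simpa using dvd_add hh (dvd_refl a))
              have := lcm_of_not_dvd (by omega) (by omega) hnd
              omega
        have ht_mem : t ∈ PySem.List.pyRange 1 ((n + 2) / 2) 1 := by
          rw [PySem.List.mem_pyRange_one]; omega
        have hm0 : (Int.lcm t (n - t) : Int) < n - 1 := by rw [htd]; omega
        rw [fold_unique_min n _ t hu 1 (n - 1) ht_mem hm0, htd]
        have hfd : PySem.Int.floordiv n p = t := by
          rw [PySem.Int.floordiv_eq_ediv_of_pos hppos, hpt,
            Int.mul_ediv_cancel_left t (by omega)]
        simp only [hfd]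
    | none =>
        have hnone := spfAux_none n 2 hspf (le_refl 2)
        rw [fold_no_improve n _ 1 (n - 1) ?_]
        · exact one_string (n - 1)
        · intro a ha
          rw [PySem.List.mem_pyRange_one] at ha
          obtain ⟨ha1, ha2⟩ := ha
          have h2a : 2 * a ≤ n := by omega
          by_cases hA1 : a = 1
          · subst hA1
            rw [lcm_of_dvd (by omega) (one_dvd _)]
            omega
          · have ha2' : 2 ≤ a := by omega
            have hdvd : ¬ a ∣ n := by
              rintro ⟨e, he⟩
              by_cases haa : a * a ≤ n
              · exact hnone a ha2' haa ⟨e, he⟩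
              · have hea : e < a := by nlinarith
                have he2 : 2 ≤ e := by nlinarith
                have hee : e * e ≤ n := by nlinarith
                exact hnone e he2 hee ⟨a, by linarith⟩
            have hnd : ¬ a ∣ n - a := by
              intro hh
              exact hdvd (by simpa using dvd_add hh (dvd_refl a))
            have := lcm_of_not_dvd (by omega) (by omega) hnd
            omega

-- ===== VERDICT (by name: the statement is the Claim_ definition above) =====
theorem correct_ans_spec : Claim_equal_correct_ans := by
  intro n _
  unfold Spec_correct_ans
  exact main_eq n
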